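-- pv_equiv track=rewrite | github.com/adrian0398/Introytaller2018 | Código/Recursión de cola/div3_.py | div3_aux
-- ===== SOURCE A (Python) =====
-- def div3_aux(num, resultado, contador):
--      if num==0:
--           return resultado
--      else:
--           if (num%10)%3!=0:
--               return div3_aux(num//10,num%10*(10**contador)+resultado,contador+1)
--           else:
--                return div3_aux(num//10,resultado,contador)
-- ===== SOURCE B (Python) =====
-- def div3_aux(num, resultado, contador):
--     # Extract the digits (least significant first), filter out those divisible
--     # by 3, then pack the kept digits into positions contador, contador+1, ...
--     digits = []
--     n = num
--     while n != 0:
--         digits.append(n % 10)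
--         n //= 10
--     kept = [d for d in digits if d % 3 != 0]
--     return resultado + sum(d * 10 ** i for i, d in enumerate(kept, contador))
-- ===== Notes on version B (the rewrite author's own statement) =====
-- stated objective: idiomatic
-- what changed: Replaces A's tail recursion threading (resultado, contador) through every call by three phases: extract the digit list with a loop, filter out digits divisible by 3, and pack the kept digits with an enumerated power-of-10 sum.
-- outside the precondition, e.g. on div3_aux(5, 0, -1): A returns 0.5, B returns 0.5; on div3_aux(-5, 0, 0): A raises RecursionError, B does not finish within the time limit
import Mathlib
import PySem

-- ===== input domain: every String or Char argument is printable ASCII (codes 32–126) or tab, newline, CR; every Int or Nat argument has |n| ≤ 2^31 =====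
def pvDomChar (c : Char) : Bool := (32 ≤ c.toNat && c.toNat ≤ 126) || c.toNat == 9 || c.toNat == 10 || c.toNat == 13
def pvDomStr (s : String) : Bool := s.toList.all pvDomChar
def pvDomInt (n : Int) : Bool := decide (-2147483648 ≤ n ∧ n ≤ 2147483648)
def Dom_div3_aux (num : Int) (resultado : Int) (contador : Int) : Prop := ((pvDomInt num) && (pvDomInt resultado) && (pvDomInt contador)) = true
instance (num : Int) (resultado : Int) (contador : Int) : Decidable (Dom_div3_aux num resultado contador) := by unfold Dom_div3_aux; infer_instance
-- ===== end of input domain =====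

-- B replaces A's tail recursion by: extract the digit list, filter out digits divisible by 3,
-- then pack the kept digits by an enumerated sum (objective: simpler/idiomatic, same cost).


-- ===== PORT A =====
-- Literal transliteration of A's tail recursion. 'if num < 0 → resultado' is only a totality
-- guard (Python diverges there; Pre_ excludes it). '10 ** contador' is ported as
-- '10 ^ contador.toNat', exact for contador ≥ 0 (Pre_ excludes contador < 0, where Python
-- produces a float).
def div3_aux (num : Int) (resultado : Int) (contador : Int) : Int :=
  if num == 0 then resultado
  else if num < 0 then resultado  -- totality guard only; outside Pre_
  else if (PySem.Int.mod num 10) % 3 ≠ 0 then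
    div3_aux (PySem.Int.floordiv num 10)
      (PySem.Int.mod num 10 * (10 ^ contador.toNat) + resultado) (contador + 1)
  else
    div3_aux (PySem.Int.floordiv num 10) resultado contador
termination_by num.toNat
decreasing_by
  all_goals
    rw [PySem.Int.floordiv_eq_ediv_of_pos (by norm_num : (0:Int) < 10)]
    simp only [beq_iff_eq, not_lt] at *
    omega

-- ===== PORT B =====
-- the digit-extraction while-loop of Source B ('n < 0 → []' is a totality guard; Python diverges there)
def pvDigits (n : Int) : List Int :=
  if n == 0 then []
  else if n < 0 then []  -- totality guard only; outside Pre_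
  else PySem.Int.mod n 10 :: pvDigits (PySem.Int.floordiv n 10)
termination_by n.toNat
decreasing_by
  rw [PySem.Int.floordiv_eq_ediv_of_pos (by norm_num : (0:Int) < 10)]
  simp only [beq_iff_eq, not_lt] at *
  omega

-- '10 ** i' with i ≥ contador ≥ 0 ported as '10 ^ i.toNat' (exact on Pre_)
def div3_aux_alt (num : Int) (resultado : Int) (contador : Int) : Int :=
  let kept := (pvDigits num).filter (fun d => d % 3 ≠ 0)
  resultado + ((PySem.List.enumerate kept contador).map (fun p => p.2 * 10 ^ p.1.toNat)).sum

-- ===== PRECONDITION & SPEC =====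
-- Pre_ excludes num < 0 (A diverges: RecursionError) and contador < 0 (A can return a float,
-- not an int: e.g. A(5,0,-1) = 0.5).
def Pre_div3_aux (num : Int) (resultado : Int) (contador : Int) : Prop :=
  0 ≤ num ∧ 0 ≤ contador
instance (num : Int) (resultado : Int) (contador : Int) : Decidable (Pre_div3_aux num resultado contador) := by unfold Pre_div3_aux; infer_instance

def pvWitness_div3_aux : Int × Int × Int := (1466, 0, 0)

def Spec_div3_aux (num : Int) (resultado : Int) (contador : Int) (out : Int) : Prop := out = div3_aux_alt num resultado contador
instance (num : Int) (resultado : Int) (contador : Int) (out : Int) : Decidable (Spec_div3_aux num resultado contador out) := by unfold Spec_div3_aux; infer_instance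

-- ===== CLAIM (what is proved, stated in full; the proofs are below) =====
def Claim_equal_div3_aux : Prop := ∀ (num : Int) (resultado : Int) (contador : Int), Dom_div3_aux num resultado contador → Pre_div3_aux num resultado contador → Spec_div3_aux num resultado contador (div3_aux num resultado contador)

-- ===== LEMMAS AND PROOFS =====

-- the enumerated packing sum of B
def pvPack (ds : List Int) (c : Int) : Int :=
  ((PySem.List.enumerate ds c).map (fun p => p.2 * 10 ^ p.1.toNat)).sum

theorem pvPack_nil (c : Int) : pvPack [] c = 0 := by
  simp [pvPack, PySem.List.enumerate]

theorem pvPack_cons (d : Int) (ds : List Int) (c : Int) :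
    pvPack (d :: ds) c = d * 10 ^ c.toNat + pvPack ds (c + 1) := by
  simp [pvPack, PySem.List.enumerate_cons]

theorem div3_aux_alt_eq (num resultado contador : Int) :
    div3_aux_alt num resultado contador
      = resultado + pvPack ((pvDigits num).filter (fun d => d % 3 ≠ 0)) contador := by
  rfl

theorem pvDigits_zero : pvDigits 0 = [] := by
  unfold pvDigits; simp

theorem pvDigits_pos {n : Int} (h : 0 < n) :
    pvDigits n = PySem.Int.mod n 10 :: pvDigits (PySem.Int.floordiv n 10) := by
  rw [pvDigits.eq_def]
  rw [if_neg (by simp; omega), if_neg (by omega)]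

theorem div3_aux_eq_alt (num resultado contador : Int)
    (hn : 0 ≤ num) (hc : 0 ≤ contador) :
    div3_aux num resultado contador = div3_aux_alt num resultado contador := by
  rw [div3_aux_alt_eq]
  induction num, resultado, contador using div3_aux.induct with
  | case1 num r c h =>
      have : num = 0 := by simpa using h
      subst this
      rw [div3_aux, pvDigits_zero]
      simp [pvPack_nil]
  | case2 num r c h h' =>
      omega
  | case3 num r c h h' hd ih =>
      have hpos : 0 < num := by
        have : ¬ num = 0 := by simpa using h
        omega
      have hq : 0 ≤ PySem.Int.floordiv num 10 := by
        rw [PySem.Int.floordiv_eq_ediv_of_pos (by norm_num)]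
        omega
      rw [div3_aux]
      rw [if_neg h, if_neg h', if_pos hd]
      rw [ih hq (by omega), pvDigits_pos hpos]
      simp only [List.filter_cons]
      rw [if_pos (by simp only [decide_eq_true_eq]; exact hd)]
      rw [pvPack_cons]
      ring
  | case4 num r c h h' hd ih =>
      have hpos : 0 < num := by
        have : ¬ num = 0 := by simpa using h
        omega
      have hq : 0 ≤ PySem.Int.floordiv num 10 := by
        rw [PySem.Int.floordiv_eq_ediv_of_pos (by norm_num)]
        omega
      rw [div3_aux]
      rw [if_neg h, if_neg h', if_neg hd]
      rw [ih hq hc, pvDigits_pos hpos]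
      simp only [List.filter_cons]
      rw [if_neg (by simp only [decide_eq_true_eq]; exact hd)]

-- ===== VERDICT (by name: the statement is the Claim_ definition above) =====
theorem div3_aux_spec : Claim_equal_div3_aux := by
  intro num resultado contador _ hpre
  unfold Spec_div3_aux
  exact div3_aux_eq_alt num resultado contador hpre.1 hpre.2
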